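-- pv_equiv track=rewrite | github.com/Vipezi/omat_projektit | python_course2022/lecture_codes/testing/generatorspython.py | numbers_names_cities
-- ===== SOURCE A (Python) =====
-- def numbers_names_cities(names, salaries, cities, times):
--     #import copy
--     all_of_them = []
--     for (a, b, c) in zip(names, salaries, cities):
--         all_of_them.append(a)
--         all_of_them.append(b)
--         all_of_them.append(c)
--     copied_list = all_of_them.copy()
--     for i in range(times):
--         yield all_of_them[i]
--         all_of_them.append(all_of_them[i])
-- ===== SOURCE B (Python) =====
-- def numbers_names_cities(names, salaries, cities, times):
--     base = [x for triple in zip(names, salaries, cities) for x in triple]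
--     n = len(base)
--     for i in range(times):
--         yield base[i % n]
-- ===== Notes on version B (the rewrite author's own statement) =====
-- stated objective: simpler
-- what changed: B builds the interleaved base once by a flattening comprehension and yields base[i % n] by modular indexing, instead of A's self-appending list that grows by one element per yield.
import Mathlib
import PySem

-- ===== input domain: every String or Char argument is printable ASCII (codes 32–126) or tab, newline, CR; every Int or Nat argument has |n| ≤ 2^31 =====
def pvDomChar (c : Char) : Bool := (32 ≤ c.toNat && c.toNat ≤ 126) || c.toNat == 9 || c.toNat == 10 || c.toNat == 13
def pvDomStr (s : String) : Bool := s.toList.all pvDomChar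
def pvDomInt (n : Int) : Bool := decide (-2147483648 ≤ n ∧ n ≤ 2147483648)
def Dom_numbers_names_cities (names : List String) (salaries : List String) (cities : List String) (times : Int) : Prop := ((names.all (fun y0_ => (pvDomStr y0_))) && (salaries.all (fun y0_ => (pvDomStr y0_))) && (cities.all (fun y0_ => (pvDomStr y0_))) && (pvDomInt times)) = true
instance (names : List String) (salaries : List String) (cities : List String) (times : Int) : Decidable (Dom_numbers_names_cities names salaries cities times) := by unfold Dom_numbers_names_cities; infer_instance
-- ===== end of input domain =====

-- B replaces A's self-appending yield list by modular indexing into the interleaved base ('simpler');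
-- the generators are compared by the list of yielded values.

-- ===== PORT A =====
-- A's second loop: yield all_of_them[i], then append that element; fuel = number of remaining iterations.
def pvLoopA : List String → Nat → Nat → List String → List String
  | _, _, 0, acc => acc.reverse
  | all, i, fuel+1, acc =>
    match all[i]? with
    | none => acc.reverse   -- Python raises IndexError here; excluded by Pre_
    | some v => pvLoopA (all ++ [v]) (i+1) fuel (v :: acc)

def numbers_names_cities (names : List String) (salaries : List String) (cities : List String) (times : Int) : List String :=
  let all_of_them := (names.zip (salaries.zip cities)).foldl
    (fun acc x => ((acc ++ [x.1]) ++ [x.2.1]) ++ [x.2.2]) []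
  pvLoopA all_of_them 0 times.toNat []

-- ===== PORT B =====
def numbers_names_cities_alt (names : List String) (salaries : List String) (cities : List String) (times : Int) : List String :=
  let base := (names.zip (salaries.zip cities)).flatMap (fun x => [x.1, x.2.1, x.2.2])
  let n := base.length
  (List.range times.toNat).map (fun i => base.getD (i % n) "")

-- ===== PRECONDITION & SPEC =====
-- Pre_ excludes exactly the inputs where A raises IndexError: times > 0 with an empty interleaved base
-- (some input list empty).  (B raises ZeroDivisionError there.)
def Pre_numbers_names_cities (names : List String) (salaries : List String) (cities : List String) (times : Int) : Prop :=
  times ≤ 0 ∨ (names ≠ [] ∧ salaries ≠ [] ∧ cities ≠ [])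
instance (names : List String) (salaries : List String) (cities : List String) (times : Int) : Decidable (Pre_numbers_names_cities names salaries cities times) := by unfold Pre_numbers_names_cities; infer_instance

def pvWitness_numbers_names_cities : List String × List String × List String × Int :=
  (["ann", "bob"], ["100", "200"], ["oulu", "turku"], 7)

def Spec_numbers_names_cities (names : List String) (salaries : List String) (cities : List String) (times : Int) (out : List String) : Prop := out = numbers_names_cities_alt names salaries cities times
instance (names : List String) (salaries : List String) (cities : List String) (times : Int) (out : List String) : Decidable (Spec_numbers_names_cities names salaries cities times out) := by unfold Spec_numbers_names_cities; infer_instance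

-- ===== CLAIM (what is proved, stated in full; the proofs are below) =====
def Claim_equal_numbers_names_cities : Prop := ∀ (names : List String) (salaries : List String) (cities : List String) (times : Int), Dom_numbers_names_cities names salaries cities times → Pre_numbers_names_cities names salaries cities times → Spec_numbers_names_cities names salaries cities times (numbers_names_cities names salaries cities times)

-- ===== LEMMAS AND PROOFS =====

-- A's base-building foldl equals B's flatMap.
theorem pv_foldl_eq_flatMap (l : List (String × String × String)) (acc : List String) :
    l.foldl (fun acc x => ((acc ++ [x.1]) ++ [x.2.1]) ++ [x.2.2]) acc
      = acc ++ l.flatMap (fun x => [x.1, x.2.1, x.2.2]) := by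
  induction l generalizing acc with
  | nil => simp
  | cons h t ih => simp [List.foldl_cons, ih, List.flatMap_def]

-- The element A reads at step i of its loop is base[i % n].
theorem pv_getA (base : List String) (hn : base ≠ []) (i : Nat) :
    (base ++ (List.range i).map (fun j => base.getD (j % base.length) ""))[i]?
      = some (base.getD (i % base.length) "") := by
  have hn' : 0 < base.length := List.length_pos_iff.mpr hn
  by_cases h : i < base.length
  · rw [List.getElem?_append_left h]
    rw [Nat.mod_eq_of_lt h, List.getD_eq_getElem _ _ h, List.getElem?_eq_getElem h]
  · push_neg at h
    rw [List.getElem?_append_right h]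
    have hlt : i - base.length < i := Nat.sub_lt (lt_of_lt_of_le hn' h) hn'
    rw [List.getElem?_map]
    rw [List.getElem?_range hlt]
    simp only [Option.map_some]
    rw [← Nat.mod_eq_sub_mod h]

-- Loop invariant: after i iterations the list is base ++ (yields so far), and the loop yields base cyclically.
theorem pv_loop_inv (base : List String) (hn : base ≠ []) :
    ∀ (fuel i : Nat) (acc : List String),
      pvLoopA (base ++ (List.range i).map (fun j => base.getD (j % base.length) "")) i fuel acc
        = acc.reverse ++ (List.range' i fuel).map (fun j => base.getD (j % base.length) "") := by
  intro fuel
  induction fuel with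
  | zero => intro i acc; simp [pvLoopA]
  | succ f ih =>
    intro i acc
    rw [pvLoopA, pv_getA base hn i]
    dsimp only
    have hrw : (base ++ (List.range i).map (fun j => base.getD (j % base.length) ""))
        ++ [base.getD (i % base.length) ""]
        = base ++ (List.range (i+1)).map (fun j => base.getD (j % base.length) "") := by
      simp [List.range_succ]
    rw [hrw, ih (i+1)]
    simp [List.range'_succ]

-- ===== VERDICT (by name: the statement is the Claim_ definition above) =====
theorem numbers_names_cities_spec : Claim_equal_numbers_names_cities := by
  intro names salaries cities times _ hpre
  unfold Spec_numbers_names_cities numbers_names_cities numbers_names_cities_alt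
  rw [pv_foldl_eq_flatMap]
  simp only [List.nil_append]
  set base := (names.zip (salaries.zip cities)).flatMap (fun x => [x.1, x.2.1, x.2.2]) with hbase
  by_cases hnil : base = []
  · have ht0 : times.toNat = 0 := by
      rcases hpre with h | ⟨hn, hs, hc⟩
      · omega
      · exfalso
        rcases names with _ | ⟨a, as⟩; · exact hn rfl
        rcases salaries with _ | ⟨b, bs⟩; · exact hs rfl
        rcases cities with _ | ⟨c, cs⟩; · exact hc rfl
        simp [hbase] at hnil
    rw [ht0]
    simp [pvLoopA]
  · have := pv_loop_inv base hnil times.toNat 0 []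
    simpa [List.range_eq_range'] using this
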